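-- pv_equiv track=rewrite | github.com/ayukyo/alltoolkit | Python/magic_square_utils/mod.py | is_pandiagonal
-- ===== SOURCE A (Python) =====
-- from typing import List, Optional, Tuple, Generator
--
-- def magic_constant(n: int) -> int:
--     """
--     计算 n 阶魔方阵的魔方常数（每行/列/对角线的和）
--
--     公式: M(n) = n * (n² + 1) / 2
--
--     Args:
--         n: 魔方阵的阶数（必须 >= 1）
--
--     Returns:
--         魔方常数
--
--     Raises:
--         ValueError: 如果 n < 1
--
--     Examples:
--         >>> magic_constant(3)
--         15
--         >>> magic_constant(4)
--         34
--         >>> magic_constant(5)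
--         65
--     """
--     if n < 1:
--         raise ValueError("阶数必须 >= 1")
--     return n * (n * n + 1) // 2
--
-- def is_pandiagonal(square: List[List[int]]) -> bool:
--     """
--     验证是否为泛对角线魔方阵（所有折对角线和也相等）
--
--     泛对角线魔方阵也称为"完美魔方阵"或"魔鬼方阵"
--
--     Args:
--         square: 二维列表表示的方阵
--
--     Returns:
--         True 如果是泛对角线魔方阵
--
--     Examples:
--         >>> # 4阶泛对角线魔方阵
--         >>> square = [[7, 12, 1, 14], [2, 13, 8, 11], [16, 3, 10, 5], [9, 6, 15, 4]]
--         >>> is_pandiagonal(square)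
--         True
--     """
--     if not square:
--         return False
--
--     n = len(square)
--     constant = magic_constant(n)
--
--     # 检查所有折对角线
--     for k in range(n):
--         # 左上到右下的折对角线（从第 k 列开始）
--         diag_sum = 0
--         for i in range(n):
--             diag_sum += square[i][(k + i) % n]
--         if diag_sum != constant:
--             return False
--
--         # 右上到左下的折对角线
--         diag_sum = 0
--         for i in range(n):
--             diag_sum += square[i][(k - i) % n]
--         if diag_sum != constant:
--             return False
--
--     return True
-- ===== SOURCE B (Python) =====
-- def is_pandiagonal(square):
--     if not square:
--         return False
--     n = len(square)
--     constant = n * (n * n + 1) // 2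
--     main = [0] * n
--     anti = [0] * n
--     for i, row in enumerate(square):
--         main = [s + row[(d + i) % n] for d, s in enumerate(main)]
--         anti = [s + row[(d - i) % n] for d, s in enumerate(anti)]
--     return all(s == constant for s in main) and all(s == constant for s in anti)
-- ===== Notes on version B (the rewrite author's own statement) =====
-- stated objective: alternative
-- what changed: Replaces A's per-diagonal re-scans (2n separate passes over the matrix, one per broken diagonal, with early exit) by a single row-wise sweep that maintains n running sums per diagonal family in two accumulator arrays, checked against the magic constant at the end.
-- outside the precondition, e.g. on is_pandiagonal([[1], [2, 3]]): A returns False, B raises IndexError; on is_pandiagonal([[5, 5], [1]]): A raises IndexError, B raises IndexError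
import Mathlib
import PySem

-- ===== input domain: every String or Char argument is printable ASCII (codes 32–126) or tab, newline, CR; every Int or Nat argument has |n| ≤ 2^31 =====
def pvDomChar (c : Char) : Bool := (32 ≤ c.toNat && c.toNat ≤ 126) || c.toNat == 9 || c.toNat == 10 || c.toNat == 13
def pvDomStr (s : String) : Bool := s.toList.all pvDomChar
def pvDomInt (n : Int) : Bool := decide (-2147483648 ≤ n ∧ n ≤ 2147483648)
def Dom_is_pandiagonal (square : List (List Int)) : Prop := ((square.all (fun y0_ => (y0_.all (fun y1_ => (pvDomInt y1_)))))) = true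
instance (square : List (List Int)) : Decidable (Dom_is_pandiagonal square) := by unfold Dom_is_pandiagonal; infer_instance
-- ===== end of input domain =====

-- B replaces A's per-diagonal re-scans by one row-wise sweep into two accumulator
-- arrays of running diagonal sums (alternative decomposition, same asymptotic cost).

-- ===== PORT A =====
-- inner loops 'for i in range(n): diag_sum += square[i][(k±i)%n]' (magic_constant is
-- inlined; its ValueError branch is unreachable here since n = len(square) ≥ 1)
def aCheck (square : List (List Int)) (n c : Int) : List Int → Bool
  | [] => true
  | k :: ks =>
    let d1 := (PySem.List.pyRange 0 n 1).foldl
      (fun s i => s + PySem.List.pyGetD (PySem.List.pyGetD square i []) (PySem.Int.mod (k + i) n) 0) 0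
    if d1 ≠ c then false
    else
      let d2 := (PySem.List.pyRange 0 n 1).foldl
        (fun s i => s + PySem.List.pyGetD (PySem.List.pyGetD square i []) (PySem.Int.mod (k - i) n) 0) 0
      if d2 ≠ c then false else aCheck square n c ks

def is_pandiagonal (square : List (List Int)) : Bool :=
  if square = [] then false
  else
    let n : Int := (square.length : Int)
    let c := PySem.Int.floordiv (n * (n * n + 1)) 2
    aCheck square n c (PySem.List.pyRange 0 n 1)

-- ===== PORT B =====
-- one step of B's row loop: add row p.2 (at row index p.1) into both accumulator arrays
def bStep (n : Int) (acc : List Int × List Int) (p : Int × List Int) : List Int × List Int :=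
  ( (PySem.List.enumerate acc.1 0).map
      (fun ds => ds.2 + PySem.List.pyGetD p.2 (PySem.Int.mod (ds.1 + p.1) n) 0)
  , (PySem.List.enumerate acc.2 0).map
      (fun ds => ds.2 + PySem.List.pyGetD p.2 (PySem.Int.mod (ds.1 - p.1) n) 0) )

def is_pandiagonal_alt (square : List (List Int)) : Bool :=
  if square = [] then false
  else
    let n : Int := (square.length : Int)
    let c := PySem.Int.floordiv (n * (n * n + 1)) 2
    let res := (PySem.List.enumerate square 0).foldl (bStep n)
      (List.replicate square.length 0, List.replicate square.length 0)
    res.1.all (fun s => s == c) && res.2.all (fun s => s == c)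

-- ===== PRECONDITION & SPEC =====
-- Pre_ excludes ragged matrices (some row shorter than the number of rows): there both
-- Pythons raise IndexError, except that A can return an early False when a complete
-- earlier diagonal already missed the constant before the short row is indexed.
def Pre_is_pandiagonal (square : List (List Int)) : Prop :=
  ∀ row ∈ square, square.length ≤ row.length
instance (square : List (List Int)) : Decidable (Pre_is_pandiagonal square) := by
  unfold Pre_is_pandiagonal; infer_instance

def pvWitness_is_pandiagonal : List (List Int) :=
  [[7, 12, 1, 14], [2, 13, 8, 11], [16, 3, 10, 5], [9, 6, 15, 4]]

def Spec_is_pandiagonal (square : List (List Int)) (out : Bool) : Prop := out = is_pandiagonal_alt square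
instance (square : List (List Int)) (out : Bool) : Decidable (Spec_is_pandiagonal square out) := by unfold Spec_is_pandiagonal; infer_instance

-- ===== CLAIM (what is proved, stated in full; the proofs are below) =====
def Claim_equal_is_pandiagonal : Prop := ∀ (square : List (List Int)), Dom_is_pandiagonal square → Pre_is_pandiagonal square → Spec_is_pandiagonal square (is_pandiagonal square)

-- ===== LEMMAS AND PROOFS =====

-- A's k-loop with early return is the conjunction over all k of the two diagonal tests
theorem aCheck_eq_all (square : List (List Int)) (n c : Int) (ks : List Int) :
    aCheck square n c ks = ks.all (fun k =>
      ((PySem.List.pyRange 0 n 1).foldl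
        (fun s i => s + PySem.List.pyGetD (PySem.List.pyGetD square i []) (PySem.Int.mod (k + i) n) 0) 0 == c)
      && ((PySem.List.pyRange 0 n 1).foldl
        (fun s i => s + PySem.List.pyGetD (PySem.List.pyGetD square i []) (PySem.Int.mod (k - i) n) 0) 0 == c)) := by
  induction ks with
  | nil => rfl
  | cons k ks ih =>
    simp only [aCheck, List.all_cons, ih]
    split_ifs with h1 h2 <;> simp_all

-- enumerating a mapped enumeration keeps the indices
theorem enumerate_map_enumerate {a b : Type} (h : Int × a → b) :
    ∀ (xs : List a) (s : Int),
    PySem.List.enumerate ((PySem.List.enumerate xs s).map h) s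
      = (PySem.List.enumerate xs s).map (fun p => (p.1, h p)) := by
  intro xs
  induction xs with
  | nil => intro s; rfl
  | cons x xs ih =>
    intro s
    simp [PySem.List.enumerate_cons, ih]

-- B's sweep unrolled: each accumulator cell ends as a left fold of its own contributions
theorem foldl_bucket (f g : Int → (Int × List Int) → Int) :
    ∀ (ps : List (Int × List Int)) (m a : List Int),
    ps.foldl (fun acc p =>
        ((PySem.List.enumerate acc.1 0).map (fun ds => ds.2 + f ds.1 p),
         (PySem.List.enumerate acc.2 0).map (fun ds => ds.2 + g ds.1 p))) (m, a)
    = ((PySem.List.enumerate m 0).map (fun ds => ps.foldl (fun s p => s + f ds.1 p) ds.2),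
       (PySem.List.enumerate a 0).map (fun ds => ps.foldl (fun s p => s + g ds.1 p) ds.2)) := by
  intro ps
  induction ps with
  | nil =>
    intro m a
    simp [PySem.List.map_snd_enumerate]
  | cons p ps ih =>
    intro m a
    rw [List.foldl_cons, ih]
    simp [enumerate_map_enumerate, List.map_map, Function.comp]

-- a tail index shifts pyGetD on a cons
theorem pyGetD_cons_of_pos {a : Type} (x : a) (xs : List a) (i : Int) (d : a) (h : 1 ≤ i) :
    PySem.List.pyGetD (x :: xs) i d = PySem.List.pyGetD xs (i - 1) d := by
  obtain ⟨n, rfl⟩ : ∃ n : Nat, i = ((n : Int) + 1) := ⟨(i - 1).toNat, by omega⟩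
  rw [show ((n : Int) + 1 - 1) = ((n : Nat) : Int) by ring]
  rw [show ((n : Int) + 1) = (((n + 1 : Nat)) : Int) by push_cast; ring]
  rw [PySem.List.pyGetD_natCast, PySem.List.pyGetD_natCast]
  simp [List.getD]

-- A's index loop over rows equals the fold over the enumeration of the rows
theorem foldl_pyRange_eq_enumerate (g : Int → Int → List Int → Int) :
    ∀ (xs : List (List Int)) (s init : Int),
    (PySem.List.pyRange s (s + xs.length) 1).foldl
        (fun acc i => g acc i (PySem.List.pyGetD xs (i - s) [])) init
    = (PySem.List.enumerate xs s).foldl (fun acc p => g acc p.1 p.2) init := by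
  intro xs
  induction xs with
  | nil => intro s init; simp [PySem.List.pyRange_one_eq_nil]
  | cons x xs ih =>
    intro s init
    rw [show s + (((x :: xs).length : Nat) : Int) = (s + 1) + ((xs.length : Nat) : Int) by
          push_cast [List.length_cons]; ring]
    rw [PySem.List.pyRange_one_cons (by have := Int.natCast_nonneg xs.length; omega)]
    rw [List.foldl_cons]
    rw [show PySem.List.pyGetD (x :: xs) (s - s) [] = x by
          rw [show s - s = (0:Int) by ring]; exact PySem.List.pyGetD_zero_cons x xs []]
    rw [PySem.List.foldl_congr_mem _ _
          (fun acc i => g acc i (PySem.List.pyGetD xs (i - (s + 1)) [])) _ ?_]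
    · rw [PySem.List.enumerate_cons, List.foldl_cons]
      exact ih (s + 1) _
    · intro acc i hi
      rw [PySem.List.mem_pyRange_one] at hi
      rw [pyGetD_cons_of_pos _ _ _ _ (by omega)]
      congr 2
      ring

-- same, started at row index 0 (the shape A's port has)
theorem foldl_pyRange_zero_eq_enumerate (g : Int → Int → List Int → Int)
    (xs : List (List Int)) (init : Int) :
    (PySem.List.pyRange 0 (xs.length : Int) 1).foldl
        (fun acc i => g acc i (PySem.List.pyGetD xs i [])) init
    = (PySem.List.enumerate xs 0).foldl (fun acc p => g acc p.1 p.2) init := by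
  have h := foldl_pyRange_eq_enumerate g xs 0 init
  simpa using h

-- the enumeration of B's zero-filled accumulator array
theorem enumerate_replicate_zero :
    ∀ (N : Nat) (s : Int),
    PySem.List.enumerate (List.replicate N (0 : Int)) s
      = (PySem.List.pyRange s (s + N) 1).map (fun k => (k, (0 : Int))) := by
  intro N
  induction N with
  | zero => intro s; simp [PySem.List.pyRange_one_eq_nil]
  | succ N ih =>
    intro s
    rw [List.replicate_succ, PySem.List.enumerate_cons, ih (s + 1)]
    rw [show s + ((N + 1 : Nat) : Int) = (s + 1) + ((N : Nat) : Int) by push_cast; ring]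
    rw [PySem.List.pyRange_one_cons
          (show s < (s + 1) + ((N : Nat) : Int) by have := Int.natCast_nonneg N; omega)]
    rw [List.map_cons]

-- all distributes over && pointwise
theorem all_and_split {a : Type} (l : List a) (p q : a → Bool) :
    l.all (fun x => p x && q x) = (l.all p && l.all q) := by
  induction l with
  | nil => rfl
  | cons x xs ih =>
    simp only [List.all_cons, ih]
    by_cases hp : p x <;> by_cases hq : q x <;> simp_all

theorem main_eq (square : List (List Int)) :
    is_pandiagonal square = is_pandiagonal_alt square := by
  by_cases hsq : square = []
  · simp [is_pandiagonal, is_pandiagonal_alt, hsq]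
  · simp only [is_pandiagonal, is_pandiagonal_alt, if_neg hsq]
    rw [aCheck_eq_all]
    have hb := foldl_bucket
      (fun d q => PySem.List.pyGetD q.2 (PySem.Int.mod (d + q.1) ((square.length : Nat) : Int)) 0)
      (fun d q => PySem.List.pyGetD q.2 (PySem.Int.mod (d - q.1) ((square.length : Nat) : Int)) 0)
      (PySem.List.enumerate square 0) (List.replicate square.length 0)
      (List.replicate square.length 0)
    rw [show bStep ((square.length : Nat) : Int)
          = fun (acc : List Int × List Int) (p : Int × List Int) =>
            ((PySem.List.enumerate acc.1 0).map (fun ds => ds.2 +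
               PySem.List.pyGetD p.2 (PySem.Int.mod (ds.1 + p.1) ((square.length : Nat) : Int)) 0),
             (PySem.List.enumerate acc.2 0).map (fun ds => ds.2 +
               PySem.List.pyGetD p.2 (PySem.Int.mod (ds.1 - p.1) ((square.length : Nat) : Int)) 0))
          from rfl]
    rw [hb]
    rw [enumerate_replicate_zero]
    simp only [List.all_map, List.map_map, zero_add]
    rw [← all_and_split]
    congr 1
    funext k
    rw [foldl_pyRange_zero_eq_enumerate
          (fun acc i row => acc + PySem.List.pyGetD row (PySem.Int.mod (k + i) ((square.length : Nat) : Int)) 0)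
          square 0,
        foldl_pyRange_zero_eq_enumerate
          (fun acc i row => acc + PySem.List.pyGetD row (PySem.Int.mod (k - i) ((square.length : Nat) : Int)) 0)
          square 0]
    simp only [Function.comp_apply]

-- ===== VERDICT (by name: the statement is the Claim_ definition above) =====
theorem is_pandiagonal_spec : Claim_equal_is_pandiagonal := by
  intro square _ _
  unfold Spec_is_pandiagonal
  exact main_eq square
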